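-- pv_equiv track=rewrite | github.com/NFUChen/GA-Solving-Vehicle-Routing-Problem | utilities/constraint_checker.py | _insert_replenish_points_for_route_helper
-- ===== SOURCE A (Python) =====
-- from typing import Dict, List
--
-- def _insert_replenish_points_for_route_helper(replenish_points: List[int], route: List[int]) -> List[int]:
--     if len(replenish_points) == 0:
--         return route
--
--     route = route.copy()
--     for point in replenish_points:
--         inserted_idx = route.index(point)
--         route.insert(inserted_idx, 0)
--     return route
-- ===== SOURCE B (Python) =====
-- def _insert_replenish_points_for_route_helper(replenish_points, route):
--     first = {}
--     for i, x in enumerate(route):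
--         if x not in first:
--             first[x] = i
--     counts = [0] * len(route)
--     for p in replenish_points:
--         counts[first[p]] += 1
--     out = []
--     for c, x in zip(counts, route):
--         out.extend([0] * c)
--         out.append(x)
--     return out
-- ===== Notes on version B (the rewrite author's own statement) =====
-- stated objective: faster
-- what changed: A rescans and re-inserts into the mutated route once per replenish point (list.index + list.insert, each O(n)); B builds a first-occurrence index of the original route once, tallies per-position zero counts in one pass over replenish_points, and emits the result in one pass over the route; Pre_ requires every replenish point to occur in the route (elsewhere B raises KeyError, and A raises ValueError except when a marker zero it inserted earlier rescues route.index(0)).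
-- intended difference: When 0 is itself a replenish point and some earlier replenish point occurs in the route before the route's first 0, A's route.index(0) finds a marker zero A itself inserted and places the new zero there (e.g. A([1,0],[1,0]) = [0,0,1,0]), while B places it before the first occurrence of 0 in the original route ([0,1,0,0]), which is the intended 'insert before the first occurrence of the point'. — e.g. on _insert_replenish_points_for_route_helper([1, 0], [1, 0]): A returns [0, 0, 1, 0], B returns [0, 1, 0, 0]
-- outside the precondition, e.g. on _insert_replenish_points_for_route_helper([1, 0], [2, 1]): A returns [2, 0, 0, 1], B raises KeyError
import Mathlib
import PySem

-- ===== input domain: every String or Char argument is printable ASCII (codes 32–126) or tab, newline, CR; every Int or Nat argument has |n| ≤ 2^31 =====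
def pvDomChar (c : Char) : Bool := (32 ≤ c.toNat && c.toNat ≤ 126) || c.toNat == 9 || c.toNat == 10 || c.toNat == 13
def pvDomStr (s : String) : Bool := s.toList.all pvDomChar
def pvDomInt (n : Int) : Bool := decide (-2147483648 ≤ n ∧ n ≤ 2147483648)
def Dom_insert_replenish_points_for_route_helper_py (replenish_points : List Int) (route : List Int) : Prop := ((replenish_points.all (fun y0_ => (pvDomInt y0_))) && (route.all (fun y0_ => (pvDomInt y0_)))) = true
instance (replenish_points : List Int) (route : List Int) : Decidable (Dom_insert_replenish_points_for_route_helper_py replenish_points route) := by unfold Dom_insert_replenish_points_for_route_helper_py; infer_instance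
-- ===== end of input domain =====

-- B replaces A's per-point list.index/list.insert rescans by a first-occurrence index built once
-- and a single emitting pass (faster); on the D_ corner below B's value intentionally differs from A's.

-- ===== PORT A =====
def insert_replenish_points_for_route_helper_py (replenish_points : List Int) (route : List Int) : List Int :=
  if replenish_points.length = 0 then route
  else
    replenish_points.foldl (fun (r : List Int) (point : Int) =>
      match PySem.List.index? r point with
      | some inserted_idx => PySem.List.insert r (inserted_idx : Int) 0
      | none => r  -- Python raises ValueError here; excluded by Pre_
      ) route

-- ===== PORT B =====
def insert_replenish_points_for_route_helper_py_alt (replenish_points : List Int) (route : List Int) : List Int :=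
  let first_idx : PySem.Dict Int Int :=
    (PySem.List.enumerate route).foldl
      (fun d ix => if d.contains ix.2 then d else d.insert ix.2 ix.1) PySem.Dict.empty
  let counts := replenish_points.foldl
    (fun (c : List Int) p =>
      match first_idx.get? p with
      | some a => PySem.List.pySetD c a (PySem.List.pyGetD c a 0 + 1)
      | none => c  -- Python raises KeyError here; excluded by Pre_
      )
    (List.replicate route.length (0 : Int))
  (List.zip counts route).foldl
    (fun out cx => out ++ List.replicate cx.1.toNat 0 ++ [cx.2]) []

-- ===== PRECONDITION & SPEC =====
-- Pre_ requires every replenish point to occur in the route: elsewhere B's first[p] raises KeyError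
-- (and A's route.index raises ValueError, except when a marker zero inserted by an earlier step
-- rescues route.index(0) for a replenish point 0 that is absent from the route).
def Pre_insert_replenish_points_for_route_helper_py (replenish_points : List Int) (route : List Int) : Prop :=
  ∀ p ∈ replenish_points, p ∈ route
instance (replenish_points : List Int) (route : List Int) : Decidable (Pre_insert_replenish_points_for_route_helper_py replenish_points route) := by unfold Pre_insert_replenish_points_for_route_helper_py; infer_instance

def pvWitness_insert_replenish_points_for_route_helper_py : List Int × List Int := ([3, 0, 2, 3], [-1, 0, 1, 2, 3, 4, 5, 6, 7, 8])

-- first-occurrence index of x in route (route.length when absent); input inspection only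
def pvIdxD (route : List Int) (x : Int) : Nat := (PySem.List.index? route x).getD route.length

-- When 0 is itself a replenish point and some earlier replenish point occurs in the route before
-- the route's first 0, A's route.index(0) finds a marker zero A itself inserted and places the new
-- zero there, while B places it before the first occurrence of 0 in the original route, which is
-- the intended 'insert before the first occurrence of the point'.
def D_insert_replenish_points_for_route_helper_py (replenish_points : List Int) (route : List Int) : Prop :=
  ∃ j < replenish_points.length, replenish_points.getD j 1 = 0 ∧
    ∃ i < j, pvIdxD route (replenish_points.getD i 0) < pvIdxD route 0
instance (replenish_points : List Int) (route : List Int) : Decidable (D_insert_replenish_points_for_route_helper_py replenish_points route) := by unfold D_insert_replenish_points_for_route_helper_py; infer_instance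

def Spec_insert_replenish_points_for_route_helper_py (replenish_points : List Int) (route : List Int) (out : List Int) : Prop := ¬ D_insert_replenish_points_for_route_helper_py replenish_points route → out = insert_replenish_points_for_route_helper_py_alt replenish_points route
instance (replenish_points : List Int) (route : List Int) (out : List Int) : Decidable (Spec_insert_replenish_points_for_route_helper_py replenish_points route out) := by unfold Spec_insert_replenish_points_for_route_helper_py; infer_instance

def pvDiffWitness_insert_replenish_points_for_route_helper_py : List Int × List Int := ([1, 0], [1, 0])
def pvDiffWitnessOut_insert_replenish_points_for_route_helper_py : (List Int) × (List Int) := ([0, 0, 1, 0], [0, 1, 0, 0])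

-- ===== CLAIM (what is proved, stated in full; the proofs are below) =====
def Claim_unchanged_insert_replenish_points_for_route_helper_py : Prop := ∀ (replenish_points : List Int) (route : List Int), Dom_insert_replenish_points_for_route_helper_py replenish_points route → Pre_insert_replenish_points_for_route_helper_py replenish_points route → Spec_insert_replenish_points_for_route_helper_py replenish_points route (insert_replenish_points_for_route_helper_py replenish_points route)
def Claim_changed_insert_replenish_points_for_route_helper_py : Prop := Dom_insert_replenish_points_for_route_helper_py (pvDiffWitness_insert_replenish_points_for_route_helper_py.1) (pvDiffWitness_insert_replenish_points_for_route_helper_py.2) ∧ Pre_insert_replenish_points_for_route_helper_py (pvDiffWitness_insert_replenish_points_for_route_helper_py.1) (pvDiffWitness_insert_replenish_points_for_route_helper_py.2) ∧ D_insert_replenish_points_for_route_helper_py (pvDiffWitness_insert_replenish_points_for_route_helper_py.1) (pvDiffWitness_insert_replenish_points_for_route_helper_py.2) ∧ insert_replenish_points_for_route_helper_py (pvDiffWitness_insert_replenish_points_for_route_helper_py.1) (pvDiffWitness_insert_replenish_points_for_route_helper_py.2) = pvDiffWitnessOut_insert_replenish_points_for_route_helper_py.1 ∧ insert_replenish_points_for_route_helper_py_alt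 (pvDiffWitness_insert_replenish_points_for_route_helper_py.1) (pvDiffWitness_insert_replenish_points_for_route_helper_py.2) = pvDiffWitnessOut_insert_replenish_points_for_route_helper_py.2 ∧ pvDiffWitnessOut_insert_replenish_points_for_route_helper_py.1 ≠ pvDiffWitnessOut_insert_replenish_points_for_route_helper_py.2
def Claim_exact_insert_replenish_points_for_route_helper_py : Prop := ∀ (replenish_points : List Int) (route : List Int), Dom_insert_replenish_points_for_route_helper_py replenish_points route → Pre_insert_replenish_points_for_route_helper_py replenish_points route → D_insert_replenish_points_for_route_helper_py replenish_points route → insert_replenish_points_for_route_helper_py replenish_points route ≠ insert_replenish_points_for_route_helper_py_alt replenish_points route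

-- ===== LEMMAS AND PROOFS =====

-- proof-side names for the loop bodies (definitionally the ports' lambdas)
def pvAStep : List Int → Int → List Int := fun r point =>
  match PySem.List.index? r point with
  | some inserted_idx => PySem.List.insert r (inserted_idx : Int) 0
  | none => r

-- A's effect rephrased with an explicit anchor (the index route.index(0) would return) in the state
def pvBStep (fd : PySem.Dict Int Int) (n : Int) : (List Int × Int) → Int → (List Int × Int) := fun st p =>
  let a : Int := if p = 0 then st.2 else fd.getD p n
  if a < n then
    (PySem.List.pySetD st.1 a (PySem.List.pyGetD st.1 a 0 + 1),
     if a < st.2 then a else st.2)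
  else st

-- B's counting loop body
def pvBStepSimple (fd : PySem.Dict Int Int) : List Int → Int → List Int := fun c p =>
  match fd.get? p with
  | some a => PySem.List.pySetD c a (PySem.List.pyGetD c a 0 + 1)
  | none => c

-- zero counts per original position, as a function
def pvZF (zeros : List Int) : Nat → Nat := fun j => (zeros.getD j 0).toNat

def pvBump (z : Nat → Nat) (a : Nat) : Nat → Nat := fun j => if j = a then z j + 1 else z j

-- the route with z i zeros spliced in before position i
def pvEmit (z : Nat → Nat) (i : Nat) : List Int → List Int
  | [] => []
  | x :: xs => List.replicate (z i) 0 ++ x :: pvEmit z (i+1) xs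

-- same, from a list of counts
def pvEmitL : List Int → List Int → List Int
  | c :: cs, x :: xs => List.replicate c.toNat 0 ++ x :: pvEmitL cs xs
  | _, _ => []

-- insert one 0 before the first occurrence of q (no-op when absent)
def pvIns (q : Int) : List Int → List Int
  | [] => []
  | y :: ys => if y = q then 0 :: y :: ys else y :: pvIns q ys

-- index of the first 0 of pvEmit z i l, in route coordinates
def pvFZ (z : Nat → Nat) (i : Nat) : List Int → Option Nat
  | [] => none
  | x :: xs => if z i ≠ 0 ∨ x = 0 then some i else pvFZ z (i+1) xs

theorem pvEmit_congr (z z' : Nat → Nat) (l : List Int) (i : Nat)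
    (h : ∀ j, i ≤ j → j < i + l.length → z j = z' j) : pvEmit z i l = pvEmit z' i l := by
  induction l generalizing i with
  | nil => rfl
  | cons x xs ih =>
      simp only [pvEmit]
      rw [h i (le_refl i) (by simp), ih (i+1) (fun j h1 h2 => h j (by omega) (by simp at h2 ⊢; omega))]

theorem pvEmit_zero (l : List Int) (i : Nat) : pvEmit (fun _ => 0) i l = l := by
  induction l generalizing i with
  | nil => rfl
  | cons x xs ih => simp [pvEmit, ih]

theorem mem_pvEmit (z : Nat → Nat) {q : Int} {l : List Int} (i : Nat) (h : q ∈ l) :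
    q ∈ pvEmit z i l := by
  induction l generalizing i with
  | nil => cases h
  | cons x xs ih =>
      simp only [pvEmit, List.mem_append, List.mem_cons]
      rcases List.mem_cons.mp h with h | h
      · exact Or.inr (Or.inl h)
      · exact Or.inr (Or.inr (ih (i+1) h))

theorem pvAStep_eq_pvIns (q : Int) (r : List Int) (h : q ∈ r) :
    pvAStep r q = pvIns q r := by
  induction r with
  | nil => cases h
  | cons y ys ih =>
      by_cases hy : y = q
      · subst hy
        unfold pvAStep
        rw [PySem.List.index?_cons_self]
        simp [pvIns, PySem.List.insert_zero]
      · have hq : q ∈ ys := by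
          rcases List.mem_cons.mp h with h' | h'
          · exact absurd h'.symm hy
          · exact h'
        unfold pvAStep
        rw [PySem.List.index?_cons_of_ne _ hy]
        rcases hi : PySem.List.index? ys q with _ | i
        · exact absurd ((PySem.List.index?_eq_none_iff ys q).mp hi) (by simp [hq])
        · obtain ⟨hk, _, _⟩ := PySem.List.getElem_of_index?_eq_some hi
          have hlen' : i ≤ ys.length := Nat.le_of_lt hk
          have hlen : i + 1 ≤ (y :: ys).length := by simpa using Nat.succ_le_succ hlen'
          simp only [Option.map_some]
          show PySem.List.insert (y :: ys) (((i + 1 : Nat) : Int)) 0 = pvIns q (y :: ys)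
          rw [PySem.List.insert_natCast _ _ _ hlen]
          have ihe : pvAStep ys q = pvIns q ys := ih hq
          have ihe' : PySem.List.insert ys ((i : Nat) : Int) 0 = pvIns q ys := by
            unfold pvAStep at ihe
            rw [hi] at ihe
            exact ihe
          rw [PySem.List.insert_natCast _ _ _ hlen'] at ihe'
          simp [pvIns, hy, List.take_succ_cons, List.drop_succ_cons, ihe']

theorem pvIns_replicate (q : Int) (hq : q ≠ 0) (n : Nat) (l : List Int) :
    pvIns q (List.replicate n 0 ++ l) = List.replicate n 0 ++ pvIns q l := by
  induction n with
  | zero => simp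
  | succ n ih => simp [List.replicate_succ, pvIns, (Ne.symm hq), ih]

-- inserting before the first occurrence of a NONZERO point bumps the count at its route index
theorem pvIns_pvEmit (p : Int) (hp : p ≠ 0) (l : List Int) (z : Nat → Nat) (i k : Nat)
    (hk : PySem.List.index? l p = some k) :
    pvIns p (pvEmit z i l) = pvEmit (pvBump z (i + k)) i l := by
  induction l generalizing i k with
  | nil => simp [PySem.List.index?] at hk
  | cons x xs ih =>
      by_cases hx : x = p
      · subst hx
        rw [PySem.List.index?_cons_self] at hk
        obtain rfl : (0 : Nat) = k := by simpa using hk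
        simp only [pvEmit]
        rw [pvIns_replicate _ hp]
        have h1 : pvIns x (x :: pvEmit z (i+1) xs) = 0 :: x :: pvEmit z (i+1) xs := by
          simp [pvIns]
        rw [h1, pvEmit_congr (pvBump z (i+0)) z xs (i+1)
              (fun j h1 h2 => by unfold pvBump; rw [if_neg (by omega)])]
        have : pvBump z (i+0) i = z i + 1 := by simp [pvBump]
        rw [this, List.replicate_succ']
        simp
      · rw [PySem.List.index?_cons_of_ne _ hx] at hk
        rcases hh : PySem.List.index? xs p with _ | k'
        · rw [hh] at hk; simp at hk
        · rw [hh] at hk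
          obtain rfl : k' + 1 = k := by simpa using hk
          simp only [pvEmit]
          rw [pvIns_replicate _ hp]
          simp only [pvIns, if_neg hx]
          rw [ih (i+1) k' hh]
          have hb : pvBump z (i + (k' + 1)) i = z i := by unfold pvBump; rw [if_neg (by omega)]
          rw [show (i + 1) + k' = i + (k' + 1) by omega, hb]

theorem pvFZ_bounds (z : Nat → Nat) (l : List Int) (i a : Nat) (h : pvFZ z i l = some a) :
    i ≤ a ∧ a < i + l.length := by
  induction l generalizing i with
  | nil => simp [pvFZ] at h
  | cons x xs ih =>
      simp only [pvFZ] at h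
      split at h
      · obtain rfl : i = a := by simpa using h
        simp
      · have := ih (i+1) h
        constructor <;> [omega; (simp; omega)]

-- pvFZ only depends on the function's values
theorem pvFZ_congr {z z' : Nat → Nat} (l : List Int) (i : Nat)
    (h : ∀ j, z j = z' j) : pvFZ z i l = pvFZ z' i l := by
  induction l generalizing i with
  | nil => rfl
  | cons x xs ih => simp only [pvFZ, h i]; split <;> simp [ih]

-- inserting a 0 before the first 0 of the current list bumps the count at pvFZ's index
theorem pvIns_zero_pvEmit (l : List Int) (z : Nat → Nat) (i a : Nat)
    (ha : pvFZ z i l = some a) :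
    pvIns 0 (pvEmit z i l) = pvEmit (pvBump z a) i l := by
  induction l generalizing i with
  | nil => simp [pvFZ] at ha
  | cons x xs ih =>
      simp only [pvFZ] at ha
      split at ha
      · rename_i hcond
        obtain rfl : i = a := by simpa using ha
        by_cases hz : z i = 0
        · have hx : x = 0 := by
            rcases hcond with h | h
            · exact absurd hz h
            · exact h
          subst hx
          simp only [pvEmit, hz, List.replicate, List.nil_append]
          have : pvIns 0 ((0:Int) :: pvEmit z (i+1) xs) = 0 :: 0 :: pvEmit z (i+1) xs := by
            simp [pvIns]
          rw [this, pvEmit_congr (pvBump z i) z xs (i+1) (fun j h1 h2 => by unfold pvBump; rw [if_neg (by omega)])]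
          have hb : pvBump z i i = z i + 1 := by simp [pvBump]
          rw [hb, hz]
          simp [List.replicate]
        · obtain ⟨m, hm⟩ : ∃ m, z i = m + 1 := ⟨z i - 1, by omega⟩
          simp only [pvEmit, hm, List.replicate_succ, List.cons_append]
          have : pvIns 0 ((0:Int) :: (List.replicate m 0 ++ x :: pvEmit z (i+1) xs))
              = 0 :: 0 :: (List.replicate m 0 ++ x :: pvEmit z (i+1) xs) := by simp [pvIns]
          rw [this, pvEmit_congr (pvBump z i) z xs (i+1) (fun j h1 h2 => by unfold pvBump; rw [if_neg (by omega)])]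
          have hb : pvBump z i i = z i + 1 := by simp [pvBump]
          rw [hb, hm]
          simp [List.replicate_succ]
      · rename_i hcond
        simp only [not_or, not_not] at hcond
        obtain ⟨hz, hx⟩ := hcond
        have hge := pvFZ_bounds z xs (i+1) a ha
        simp only [pvEmit, hz, List.replicate, List.nil_append]
        have : pvIns 0 (x :: pvEmit z (i+1) xs) = x :: pvIns 0 (pvEmit z (i+1) xs) := by
          simp [pvIns, hx]
        rw [this, ih (i+1) ha]
        have hb : pvBump z a i = z i := by unfold pvBump; rw [if_neg (by omega)]
        rw [hb, hz]
        simp [List.replicate]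

-- bumping at a (inside range) moves the first zero to min(previous, a)
theorem pvFZ_bump (z : Nat → Nat) (l : List Int) (i a : Nat)
    (h1 : i ≤ a) (h2 : a < i + l.length) :
    pvFZ (pvBump z a) i l = some (min ((pvFZ z i l).getD (i + l.length)) a) := by
  induction l generalizing i with
  | nil => simp at h2; omega
  | cons x xs ih =>
      by_cases hia : a = i
      · subst hia
        have hcond : pvBump z a a ≠ 0 ∨ x = 0 := Or.inl (by simp [pvBump])
        have hlhs : pvFZ (pvBump z a) a (x :: xs) = some a := by
          simp only [pvFZ, if_pos hcond]
        rw [hlhs]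
        congr 1
        rcases ho : pvFZ z a (x :: xs) with _ | m
        · simp
        · have hb := pvFZ_bounds z (x :: xs) a m ho
          simp
          omega
      · have hbi : pvBump z a i = z i := by unfold pvBump; rw [if_neg (by omega)]
        by_cases hcond : z i ≠ 0 ∨ x = 0
        · have hlhs : pvFZ (pvBump z a) i (x :: xs) = some i := by
            simp only [pvFZ, hbi, if_pos hcond]
          have hrhs : pvFZ z i (x :: xs) = some i := by
            simp only [pvFZ, if_pos hcond]
          rw [hlhs, hrhs]
          congr 1
          simp
          omega
        · have hlhs : pvFZ (pvBump z a) i (x :: xs) = pvFZ (pvBump z a) (i+1) xs := by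
            simp only [pvFZ, hbi, if_neg hcond]
          have hrhs : pvFZ z i (x :: xs) = pvFZ z (i+1) xs := by
            simp only [pvFZ, if_neg hcond]
          rw [hlhs, hrhs, ih (i+1) (by omega) (by simp at h2 ⊢; omega)]
          have : (i + 1) + xs.length = i + (x :: xs).length := by simp; omega
          rw [this]

theorem pvFZ_isSome_of_mem (z : Nat → Nat) (l : List Int) (i : Nat) (h : (0:Int) ∈ l) :
    (pvFZ z i l).isSome := by
  induction l generalizing i with
  | nil => cases h
  | cons x xs ih =>
      simp only [pvFZ]
      split
      · simp
      · rename_i hcond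
        simp only [not_or, not_not] at hcond
        rcases List.mem_cons.mp h with h' | h'
        · exact absurd h'.symm hcond.2
        · exact ih (i+1) h'

theorem mem_zero_pvEmit_of_pvFZ (z : Nat → Nat) (l : List Int) (i a : Nat)
    (h : pvFZ z i l = some a) : (0:Int) ∈ pvEmit z i l := by
  induction l generalizing i with
  | nil => simp [pvFZ] at h
  | cons x xs ih =>
      simp only [pvFZ] at h
      split at h
      · rename_i hcond
        simp only [pvEmit, List.mem_append, List.mem_cons]
        by_cases hz : z i = 0
        · have hx : x = 0 := by
            rcases hcond with h' | h'
            · exact absurd hz h'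
            · exact h'
          exact Or.inr (Or.inl hx.symm)
        · exact Or.inl (by simp [List.mem_replicate]; omega)
      · simp only [pvEmit, List.mem_append, List.mem_cons]
        exact Or.inr (Or.inr (ih (i+1) h))

-- the first-occurrence dict built by B's first loop
theorem pvFirstDict_get? (xs : List Int) (d : PySem.Dict Int Int) (s : Int) (x : Int) :
    ((PySem.List.enumerate xs s).foldl
        (fun d ix => if d.contains ix.2 then d else d.insert ix.2 ix.1) d).get? x
    = if d.contains x then d.get? x
      else (PySem.List.index? xs x).map (fun k => s + (k : Int)) := by
  induction xs generalizing d s with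
  | nil =>
      simp only [PySem.List.enumerate_nil, List.foldl_nil, PySem.List.index?]
      by_cases hc : d.contains x
      · simp [hc]
      · simp [hc, (PySem.Dict.get?_eq_none_iff_contains d x).mpr (by simp [hc])]
  | cons y ys ih =>
      rw [PySem.List.enumerate_cons, List.foldl_cons]
      by_cases hcy : d.contains y
      · rw [if_pos hcy, ih]
        by_cases hx : x = y
        · subst hx
          simp [hcy]
        · by_cases hcx : d.contains x
          · simp [hcx]
          · rw [if_neg hcx, if_neg hcx, PySem.List.index?_cons_of_ne _ (fun h => hx h.symm)]
            rcases PySem.List.index? ys x with _ | k <;> simp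
            omega
      · rw [if_neg hcy, ih]
        by_cases hx : x = y
        · subst hx
          rw [PySem.List.index?_cons_self]
          simp [PySem.Dict.contains_insert_self, PySem.Dict.get?_insert_self, hcy]
        · rw [PySem.List.index?_cons_of_ne _ (fun h => hx h.symm)]
          have hci : (d.insert y s).contains x = d.contains x := by
            rw [PySem.Dict.contains_insert]
            simp [hx]
          rw [hci, PySem.Dict.get?_insert_of_ne _ _ hx]
          by_cases hcx : d.contains x
          · simp [hcx]
          · rw [if_neg hcx, if_neg hcx]
            rcases PySem.List.index? ys x with _ | k <;> simp
            omega

theorem pvFirstDict_get0 (route : List Int) (p : Int) :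
    ((PySem.List.enumerate route).foldl
        (fun d ix => if d.contains ix.2 then d else d.insert ix.2 ix.1)
        PySem.Dict.empty).get? p
    = (PySem.List.index? route p).map (fun k => ((k : Nat) : Int)) := by
  rw [pvFirstDict_get?]
  simp only [PySem.Dict.contains_empty, if_false, Bool.false_eq_true]
  rcases PySem.List.index? route p with _ | k <;> simp

theorem pvFirstDict_getD (route : List Int) (p : Int) :
    ((PySem.List.enumerate route).foldl
        (fun d ix => if d.contains ix.2 then d else d.insert ix.2 ix.1)
        PySem.Dict.empty).getD p (route.length : Int)
    = (match PySem.List.index? route p with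
       | some k => (k : Int)
       | none => (route.length : Int)) := by
  rw [PySem.Dict.getD_eq_get?_getD, pvFirstDict_get0]
  rcases PySem.List.index? route p with _ | k <;> simp

theorem pvZF_set (zeros : List Int) (k : Nat) (hk : k < zeros.length)
    (hnn : ∀ v ∈ zeros, 0 ≤ v) (j : Nat) :
    pvZF (zeros.set k (zeros.getD k 0 + 1)) j = pvBump (pvZF zeros) k j := by
  have hv : 0 ≤ zeros.getD k 0 := by
    have h0 : zeros.getD k 0 = zeros[k] := by
      rw [List.getD_eq_getElem?_getD, List.getElem?_eq_getElem hk, Option.getD_some]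
    rw [h0]; exact hnn _ (List.getElem_mem hk)
  unfold pvZF pvBump
  by_cases hj : j = k
  · subst hj
    have h1 : (zeros.set j (zeros.getD j 0 + 1)).getD j 0 = zeros.getD j 0 + 1 := by
      rw [List.getD_eq_getElem?_getD, List.getElem?_set, if_pos rfl, if_pos hk, Option.getD_some]
    rw [h1, if_pos rfl]
    show (zeros.getD j 0 + 1).toNat = (zeros.getD j 0).toNat + 1
    omega
  · have h2 : (zeros.set k (zeros.getD k 0 + 1)).getD j 0 = zeros.getD j 0 := by
      rw [List.getD_eq_getElem?_getD, List.getElem?_set, if_neg (fun h => hj h.symm),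
          ← List.getD_eq_getElem?_getD]
    rw [h2, if_neg hj]

theorem pvBStep_zero (fd : PySem.Dict Int Int) (n : Int) (zeros : List Int) (anchor : Int)
    (h : anchor < n) :
    pvBStep fd n (zeros, anchor) 0
      = (PySem.List.pySetD zeros anchor (PySem.List.pyGetD zeros anchor 0 + 1),
         if anchor < anchor then anchor else anchor) := by
  simp [pvBStep, h]

theorem pvBStep_nonzero (fd : PySem.Dict Int Int) (n : Int) (zeros : List Int) (anchor : Int)
    (p : Int) (hp : p ≠ 0) (h : fd.getD p n < n) :
    pvBStep fd n (zeros, anchor) p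
      = (PySem.List.pySetD zeros (fd.getD p n) (PySem.List.pyGetD zeros (fd.getD p n) 0 + 1),
         if fd.getD p n < anchor then fd.getD p n else anchor) := by
  simp [pvBStep, hp, h]

-- the main invariant: A's route state tracks the anchored (zeros, anchor) state through the fold over rp
theorem pvMainInv (route : List Int) (fd : PySem.Dict Int Int)
    (hfd : ∀ p : Int, fd.getD p (route.length : Int)
        = (match PySem.List.index? route p with
           | some k => (k : Int)
           | none => (route.length : Int)))
    (rp : List Int) (hall : ∀ p ∈ rp, p ≠ 0 → p ∈ route)
    (zeros : List Int) (anchor : Int)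
    (hlen : zeros.length = route.length)
    (hnn : ∀ v ∈ zeros, 0 ≤ v)
    (hanchor : anchor = (((pvFZ (pvZF zeros) 0 route).getD route.length : Nat) : Int))
    (hhead : (0:Int) ∈ rp → ((pvFZ (pvZF zeros) 0 route).isSome ∨ rp.head? ≠ some 0)) :
    (rp.foldl (pvBStep fd (route.length : Int)) (zeros, anchor)).1.length = route.length ∧
    (∀ v ∈ (rp.foldl (pvBStep fd (route.length : Int)) (zeros, anchor)).1, 0 ≤ v) ∧
    rp.foldl pvAStep (pvEmit (pvZF zeros) 0 route)
      = pvEmit (pvZF (rp.foldl (pvBStep fd (route.length : Int)) (zeros, anchor)).1) 0 route := by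
  induction rp generalizing zeros anchor with
  | nil => exact ⟨hlen, hnn, rfl⟩
  | cons p ps ih =>
      simp only [List.foldl_cons]
      have hstep : ∃ k : Nat, k < route.length ∧
          pvBStep fd (route.length : Int) (zeros, anchor) p
            = (zeros.set k (zeros.getD k 0 + 1), if (k:Int) < anchor then (k:Int) else anchor) ∧
          pvAStep (pvEmit (pvZF zeros) 0 route) p = pvEmit (pvBump (pvZF zeros) k) 0 route := by
        by_cases hp : p = 0
        · subst hp
          have hsome : (pvFZ (pvZF zeros) 0 route).isSome := by
            rcases hhead (by simp) with h | h
            · exact h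
            · exact absurd (rfl : ((0:Int) :: ps).head? = some 0) h
          rcases ho : pvFZ (pvZF zeros) 0 route with _ | m
          · rw [ho] at hsome; simp at hsome
          · have hm := pvFZ_bounds _ _ _ _ ho
            refine ⟨m, by omega, ?_, ?_⟩
            · have hav : anchor = (m : Int) := by rw [hanchor, ho]; rfl
              have hlt : (m : Int) < (route.length : Int) := by
                exact_mod_cast (by omega : m < route.length)
              rw [hav, pvBStep_zero fd _ zeros _ hlt,
                  PySem.List.pySetD_natCast, PySem.List.pyGetD_natCast,
                  if_neg (lt_irrefl ((m:Nat) : Int))]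
            · rw [pvAStep_eq_pvIns 0 _ (mem_zero_pvEmit_of_pvFZ _ _ _ _ ho)]
              exact pvIns_zero_pvEmit route (pvZF zeros) 0 m ho
        · have hmem : p ∈ route := hall p (List.mem_cons_self) hp
          rcases hidx : PySem.List.index? route p with _ | k
          · exact absurd ((PySem.List.index?_eq_none_iff route p).mp hidx) (by simp [hmem])
          · obtain ⟨hk, _, _⟩ := PySem.List.getElem_of_index?_eq_some hidx
            refine ⟨k, hk, ?_, ?_⟩
            · have hfdp : fd.getD p (route.length : Int) = (k : Int) := by rw [hfd p, hidx]
              have hlt : (k : Int) < (route.length : Int) := by exact_mod_cast hk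
              rw [pvBStep_nonzero fd _ zeros anchor p hp (by rw [hfdp]; exact hlt), hfdp,
                  PySem.List.pySetD_natCast, PySem.List.pyGetD_natCast]
            · rw [pvAStep_eq_pvIns p _ (mem_pvEmit _ 0 hmem)]
              have := pvIns_pvEmit p hp route (pvZF zeros) 0 k hidx
              simpa using this
      obtain ⟨k, hkn, hB, hA⟩ := hstep
      rw [hB, hA]
      have hzf : ∀ j, pvZF (zeros.set k (zeros.getD k 0 + 1)) j = pvBump (pvZF zeros) k j :=
        pvZF_set zeros k (by omega) hnn
      have hfznew := pvFZ_bump (pvZF zeros) route 0 k (by omega) (by omega)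
      have hfznew' : pvFZ (pvZF (zeros.set k (zeros.getD k 0 + 1))) 0 route
          = some (min ((pvFZ (pvZF zeros) 0 route).getD (0 + route.length)) k) := by
        rw [pvFZ_congr route 0 hzf]
        exact hfznew
      have hlen' : (zeros.set k (zeros.getD k 0 + 1)).length = route.length := by
        simp [hlen]
      have hnn' : ∀ v ∈ zeros.set k (zeros.getD k 0 + 1), 0 ≤ v := by
        intro v hv
        rcases List.mem_or_eq_of_mem_set hv with h | h
        · exact hnn v h
        · subst h
          have : 0 ≤ zeros.getD k 0 := by
            by_cases hkz : k < zeros.length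
            · have : zeros.getD k 0 = zeros[k] := by
                simp [List.getD, List.getElem?_eq_getElem hkz]
              rw [this]; exact hnn _ (List.getElem_mem hkz)
            · simp [List.getD, List.getElem?_eq_none (by omega : zeros.length ≤ k)]
          omega
      have hanchor' : (if (k:Int) < anchor then (k:Int) else anchor)
          = (((pvFZ (pvZF (zeros.set k (zeros.getD k 0 + 1))) 0 route).getD route.length : Nat) : Int) := by
        rw [hfznew']
        simp only [Option.getD_some]
        rw [hanchor]
        rcases ho : pvFZ (pvZF zeros) 0 route with _ | m
        · simp only [Option.getD_none]
          have hlt : (k:Int) < (route.length : Int) := by exact_mod_cast hkn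
          rw [if_pos hlt]
          congr 1
          simp
          omega
        · simp only [Option.getD_some]
          by_cases hlt : k < m
          · rw [if_pos (by exact_mod_cast hlt)]
            congr 1
            omega
          · rw [if_neg (by exact_mod_cast hlt)]
            congr 1
            omega
      have hhead' : (0:Int) ∈ ps → ((pvFZ (pvZF (zeros.set k (zeros.getD k 0 + 1))) 0 route).isSome ∨ ps.head? ≠ some 0) := by
        intro _
        left
        rw [hfznew']
        simp
      have := ih (fun q hq hq0 => hall q (List.mem_cons_of_mem _ hq) hq0)
        (zeros.set k (zeros.getD k 0 + 1))
        (if (k:Int) < anchor then (k:Int) else anchor)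
        hlen' hnn' hanchor' hhead'
      rw [pvEmit_congr (pvBump (pvZF zeros) k) (pvZF (zeros.set k (zeros.getD k 0 + 1))) route 0
            (fun j _ _ => (hzf j).symm)]
      exact this

theorem pvFZ_of_zf_zero (l : List Int) (i : Nat) :
    pvFZ (fun _ => 0) i l = (PySem.List.index? l 0).map (fun k => i + k) := by
  induction l generalizing i with
  | nil => simp [pvFZ, PySem.List.index?]
  | cons x xs ih =>
      by_cases hx : x = 0
      · subst hx
        rw [PySem.List.index?_cons_self]
        simp [pvFZ]
      · rw [PySem.List.index?_cons_of_ne _ hx]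
        have hstep : pvFZ (fun _ => 0) i (x :: xs) = pvFZ (fun _ => 0) (i+1) xs := by
          simp only [pvFZ]
          rw [if_neg (by simp [hx])]
        rw [hstep, ih (i+1)]
        rcases PySem.List.index? xs (0:Int) with _ | k
        · simp
        · simp
          omega

theorem pvZF_replicate (n : Nat) (j : Nat) : pvZF (List.replicate n (0:Int)) j = 0 := by
  unfold pvZF
  rw [List.getD_eq_getElem?_getD, List.getElem?_replicate]
  split <;> simp

-- B's final zip loop emits exactly pvEmit of the counts
theorem pvZipFold (zeros l out : List Int) (hlen : zeros.length = l.length) :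
    (List.zip zeros l).foldl (fun out cx => out ++ List.replicate cx.1.toNat 0 ++ [cx.2]) out
      = out ++ pvEmitL zeros l := by
  induction zeros generalizing l out with
  | nil =>
      cases l with
      | nil => simp [pvEmitL]
      | cons x xs => simp at hlen
  | cons c cs ih =>
      cases l with
      | nil => simp at hlen
      | cons x xs =>
          simp only [List.zip_cons_cons, List.foldl_cons]
          rw [ih xs _ (by simpa using hlen)]
          simp [pvEmitL]

theorem pvEmitL_eq (zeros l : List Int) (hlen : zeros.length = l.length) :
    pvEmitL zeros l = pvEmit (pvZF zeros) 0 l := by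
  suffices h : ∀ (zeros l : List Int) (i : Nat), zeros.length = l.length →
      pvEmitL zeros l = pvEmit (fun j => (zeros.getD (j - i) 0).toNat) i l by
    have := h zeros l 0 hlen
    rw [this]
    exact pvEmit_congr _ _ l 0 (fun j _ _ => by simp [pvZF])
  intro zeros l
  induction zeros generalizing l with
  | nil =>
      intro i hl
      cases l with
      | nil => rfl
      | cons x xs => simp at hl
  | cons c cs ih =>
      intro i hl
      cases l with
      | nil => simp at hl
      | cons x xs =>
          simp only [pvEmitL, pvEmit]
          have h1 : ((c :: cs).getD (i - i) 0) = c := by simp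
          rw [h1]
          have h2 : pvEmit (fun j => ((c :: cs).getD (j - i) 0).toNat) (i+1) xs
              = pvEmit (fun j => (cs.getD (j - (i+1)) 0).toNat) (i+1) xs := by
            refine pvEmit_congr _ _ xs (i+1) (fun j hj1 hj2 => ?_)
            have : j - i = (j - (i+1)) + 1 := by omega
            rw [this]
            simp
          rw [h2, ih xs (i+1) (by simpa using hl)]

-- structural characterisation of D_ over a cons
theorem pvD_cons (p : Int) (rest route : List Int) :
    D_insert_replenish_points_for_route_helper_py (p :: rest) route
      ↔ (((0:Int) ∈ rest ∧ pvIdxD route p < pvIdxD route 0)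
          ∨ D_insert_replenish_points_for_route_helper_py rest route) := by
  unfold D_insert_replenish_points_for_route_helper_py
  constructor
  · rintro ⟨j, hj, hj0, i, hij, hlt⟩
    obtain ⟨j', rfl⟩ : ∃ j', j = j' + 1 := ⟨j - 1, by omega⟩
    rw [List.getD_cons_succ] at hj0
    have hj' : j' < rest.length := by simpa using hj
    cases i with
    | zero =>
        left
        rw [List.getD_cons_zero] at hlt
        refine ⟨?_, hlt⟩
        have : rest.getD j' 1 = rest[j'] := by
          rw [List.getD_eq_getElem?_getD, List.getElem?_eq_getElem hj', Option.getD_some]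
        rw [this] at hj0
        exact hj0 ▸ List.getElem_mem hj'
    | succ i' =>
        right
        rw [List.getD_cons_succ] at hlt
        exact ⟨j', hj', hj0, i', by omega, hlt⟩
  · rintro (⟨hmem, hlt⟩ | ⟨j, hj, hj0, i, hij, hlt⟩)
    · obtain ⟨j', hj', hje⟩ := List.getElem_of_mem hmem
      refine ⟨j' + 1, by simpa using hj', ?_, 0, by omega, ?_⟩
      · rw [List.getD_cons_succ, List.getD_eq_getElem?_getD, List.getElem?_eq_getElem hj',
            Option.getD_some, hje]
      · rw [List.getD_cons_zero]; exact hlt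
    · exact ⟨j + 1, by simpa using hj, by rw [List.getD_cons_succ]; exact hj0,
        i + 1, by omega, by rw [List.getD_cons_succ]; exact hlt⟩

-- outside D_: the anchored fold's zero counts coincide with B's simple counting fold
theorem pvNoAnchor (route : List Int) (fd : PySem.Dict Int Int)
    (hfdg : ∀ p : Int, fd.get? p = (PySem.List.index? route p).map (fun k => ((k : Nat) : Int)))
    (rest : List Int) (hall : ∀ p ∈ rest, p ∈ route)
    (zeros : List Int) (anchor : Int)
    (h0 : (0:Int) ∈ rest → anchor = ((pvIdxD route 0 : Nat) : Int))
    (hnd : ¬ D_insert_replenish_points_for_route_helper_py rest route) :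
    (rest.foldl (pvBStep fd (route.length : Int)) (zeros, anchor)).1
      = rest.foldl (pvBStepSimple fd) zeros := by
  induction rest generalizing zeros anchor with
  | nil => rfl
  | cons p rest' ih =>
      rw [pvD_cons] at hnd
      rw [not_or, not_and_or, not_lt] at hnd
      rcases hnd with ⟨hnd1', hnd2⟩
      have hnd1 : (0:Int) ∈ rest' → pvIdxD route 0 ≤ pvIdxD route p := by
        intro hm; rcases hnd1' with h | h; exacts [absurd hm h, h]
      have hfdD : ∀ q : Int, fd.getD q (route.length : Int)
          = (match PySem.List.index? route q with
             | some k => (k : Int)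
             | none => (route.length : Int)) := by
        intro q
        rw [PySem.Dict.getD_eq_get?_getD, hfdg q]
        rcases PySem.List.index? route q with _ | k <;> simp
      have hmem : p ∈ route := hall p List.mem_cons_self
      rcases hidx : PySem.List.index? route p with _ | k
      · exact absurd ((PySem.List.index?_eq_none_iff route p).mp hidx) (by simp [hmem])
      obtain ⟨hk, _, _⟩ := PySem.List.getElem_of_index?_eq_some hidx
      have hkInt : ((k : Nat) : Int) < (route.length : Int) := by exact_mod_cast hk
      simp only [List.foldl_cons]
      by_cases hp : p = 0
      · -- p = 0: anchor = first index of 0, same bump as B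
        subst hp
        have hanch : anchor = ((k : Nat) : Int) := by
          rw [h0 List.mem_cons_self]
          unfold pvIdxD
          rw [hidx, Option.getD_some]
        have hBs : pvBStep fd (route.length : Int) (zeros, anchor) 0
            = (zeros.set k (zeros.getD k 0 + 1), anchor) := by
          rw [hanch, pvBStep_zero fd _ zeros _ hkInt,
              PySem.List.pySetD_natCast, PySem.List.pyGetD_natCast,
              if_neg (lt_irrefl ((k:Nat) : Int))]
        have hSs : pvBStepSimple fd zeros 0 = zeros.set k (zeros.getD k 0 + 1) := by
          unfold pvBStepSimple
          rw [hfdg 0, hidx]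
          simp only [Option.map_some]
          rw [PySem.List.pySetD_natCast, PySem.List.pyGetD_natCast]
        rw [hBs, hSs]
        exact ih (fun q hq => hall q (List.mem_cons_of_mem _ hq)) _ anchor
          (fun hm => hanch.trans (by unfold pvIdxD; rw [hidx, Option.getD_some])) hnd2
      · -- p ≠ 0: same bump; anchor stays at first-0 whenever 0 still occurs later
        have hBs : pvBStep fd (route.length : Int) (zeros, anchor) p
            = (zeros.set k (zeros.getD k 0 + 1),
               if ((k:Nat):Int) < anchor then ((k:Nat):Int) else anchor) := by
          have hfdp : fd.getD p (route.length : Int) = ((k:Nat) : Int) := by rw [hfdD p, hidx]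
          rw [pvBStep_nonzero fd _ zeros anchor p hp (by rw [hfdp]; exact hkInt), hfdp,
              PySem.List.pySetD_natCast, PySem.List.pyGetD_natCast]
        have hSs : pvBStepSimple fd zeros p = zeros.set k (zeros.getD k 0 + 1) := by
          unfold pvBStepSimple
          rw [hfdg p, hidx]
          simp only [Option.map_some]
          rw [PySem.List.pySetD_natCast, PySem.List.pyGetD_natCast]
        rw [hBs, hSs]
        refine ih (fun q hq => hall q (List.mem_cons_of_mem _ hq)) _
          (if ((k:Nat):Int) < anchor then ((k:Nat):Int) else anchor) ?_ hnd2
        intro hm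
        have hge : pvIdxD route 0 ≤ pvIdxD route p := hnd1 hm
        have hpidx : pvIdxD route p = k := by unfold pvIdxD; rw [hidx, Option.getD_some]
        have hanch : anchor = ((pvIdxD route 0 : Nat) : Int) := h0 (List.mem_cons_of_mem _ hm)
        rw [hanch]
        rw [if_neg (by rw [hpidx] at hge; exact_mod_cast not_lt.mpr hge)]

-- ===== VERDICT (by name: the statements are the Claim_ definitions above) =====
theorem insert_replenish_points_for_route_helper_py_spec : Claim_unchanged_insert_replenish_points_for_route_helper_py := by
  intro rp route _ hpre
  unfold Spec_insert_replenish_points_for_route_helper_py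
  intro hnd
  have hall0 : ∀ p ∈ rp, p ≠ 0 → p ∈ route := fun p hp _ => hpre p hp
  have hfd := pvFirstDict_getD route
  have hfdg := pvFirstDict_get0 route
  have hanchor0 : ((PySem.List.enumerate route).foldl
        (fun d ix => if d.contains ix.2 then d else d.insert ix.2 ix.1)
        PySem.Dict.empty).getD 0 (route.length : Int)
      = (((pvFZ (pvZF (List.replicate route.length (0:Int))) 0 route).getD route.length : Nat) : Int) := by
    rw [hfd 0, pvFZ_congr route 0 (pvZF_replicate route.length), pvFZ_of_zf_zero]
    rcases PySem.List.index? route (0:Int) with _ | k <;> simp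
  have hhead0 : (0:Int) ∈ rp → ((pvFZ (pvZF (List.replicate route.length (0:Int))) 0 route).isSome ∨ rp.head? ≠ some 0) := by
    intro hmem
    exact Or.inl (pvFZ_isSome_of_mem _ _ _ (hpre 0 hmem))
  have hmain := pvMainInv route _ hfd rp hall0
    (List.replicate route.length (0:Int))
    (((PySem.List.enumerate route).foldl
        (fun d ix => if d.contains ix.2 then d else d.insert ix.2 ix.1)
        PySem.Dict.empty).getD 0 (route.length : Int))
    (by simp) (by intro v hv; simp [List.eq_of_mem_replicate hv]) hanchor0 hhead0
  obtain ⟨hlen', _, hAB⟩ := hmain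
  have hanchIdx : ((PySem.List.enumerate route).foldl
        (fun d ix => if d.contains ix.2 then d else d.insert ix.2 ix.1)
        PySem.Dict.empty).getD 0 (route.length : Int)
      = (((pvIdxD route 0 : Nat)) : Int) ∨ (0:Int) ∉ rp := by
    by_cases hm : (0:Int) ∈ rp
    · left
      rw [hfd 0]
      unfold pvIdxD
      rcases hio : PySem.List.index? route (0:Int) with _ | k
      · exact absurd ((PySem.List.index?_eq_none_iff route 0).mp hio) (by simp [hpre 0 hm])
      · simp
    · exact Or.inr hm
  have hNo := pvNoAnchor route _ hfdg rp (fun p hp => hpre p hp)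
    (List.replicate route.length (0:Int))
    (((PySem.List.enumerate route).foldl
        (fun d ix => if d.contains ix.2 then d else d.insert ix.2 ix.1)
        PySem.Dict.empty).getD 0 (route.length : Int))
    (by
      intro hm
      rcases hanchIdx with h | h
      · exact h
      · exact absurd hm h) hnd
  have hB : insert_replenish_points_for_route_helper_py_alt rp route
      = (List.zip (rp.foldl (pvBStepSimple ((PySem.List.enumerate route).foldl
            (fun d ix => if d.contains ix.2 then d else d.insert ix.2 ix.1) PySem.Dict.empty))
          (List.replicate route.length (0:Int))) route).foldl
          (fun out cx => out ++ List.replicate cx.1.toNat 0 ++ [cx.2]) [] := rfl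
  have hA : insert_replenish_points_for_route_helper_py rp route
      = if rp.length = 0 then route else rp.foldl pvAStep route := rfl
  have hlenS : (rp.foldl (pvBStepSimple ((PySem.List.enumerate route).foldl
        (fun d ix => if d.contains ix.2 then d else d.insert ix.2 ix.1) PySem.Dict.empty))
      (List.replicate route.length (0:Int))).length = route.length := by
    rw [← hNo]; exact hlen'
  rw [hB, hA, pvZipFold _ _ _ hlenS, pvEmitL_eq _ _ hlenS, ← hNo]
  simp only [List.nil_append]
  by_cases hrp : rp.length = 0
  · have : rp = [] := List.length_eq_zero_iff.mp hrp
    subst this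
    rw [if_pos (show ([] : List Int).length = 0 from rfl)]
    simp only [List.foldl_nil]
    rw [pvEmit_congr _ (fun _ => 0) route 0 (fun j _ _ => pvZF_replicate route.length j),
        pvEmit_zero]
  · rw [if_neg hrp, ← hAB,
        pvEmit_congr _ (fun _ => 0) route 0 (fun j _ _ => pvZF_replicate route.length j),
        pvEmit_zero]

theorem insert_replenish_points_for_route_helper_py_changed : Claim_changed_insert_replenish_points_for_route_helper_py := by
  unfold Claim_changed_insert_replenish_points_for_route_helper_py
  decide

-- ===== tightness: A and B differ EVERYWHERE inside D_ =====

-- proof-side names for the folds the two ports perform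
def pvFD (route : List Int) : PySem.Dict Int Int :=
  (PySem.List.enumerate route).foldl
    (fun d ix => if d.contains ix.2 then d else d.insert ix.2 ix.1) PySem.Dict.empty

def pvZA (rp route : List Int) : List Int :=
  (rp.foldl (pvBStep (pvFD route) (route.length : Int))
    (List.replicate route.length (0:Int), (pvFD route).getD 0 (route.length : Int))).1

def pvZS (rp route : List Int) : List Int :=
  rp.foldl (pvBStepSimple (pvFD route)) (List.replicate route.length (0:Int))

-- two lists that agree below a and disagree at the run boundary of a nonzero element differ
theorem pvRep_ne (a b : Nat) (hab : a < b) (x : Int) (hx : x ≠ 0) (t t' : List Int) :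
    List.replicate a (0:Int) ++ x :: t ≠ List.replicate b 0 ++ x :: t' := by
  intro h
  have h1 : (List.replicate a (0:Int) ++ x :: t)[a]? = some x := by
    rw [List.getElem?_append_right (by simp)]
    simp
  have h2 : (List.replicate b (0:Int) ++ x :: t')[a]? = some 0 := by
    rw [List.getElem?_append_left (by simp [hab])]
    simp [hab]
  rw [h, h2] at h1
  exact hx (by injection h1 with hv; exact hv.symm)

-- pvEmit is injective at the first count difference when the route element there is nonzero
theorem pvEmit_ne (z z' : Nat → Nat) (l : List Int) (i j : Nat)
    (hij : i ≤ j) (hjl : j < i + l.length)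
    (hdiff : z j ≠ z' j) (hfirst : ∀ j', i ≤ j' → j' < j → z j' = z' j')
    (hnz : l.getD (j - i) 0 ≠ 0) :
    pvEmit z i l ≠ pvEmit z' i l := by
  induction l generalizing i with
  | nil => simp at hjl; omega
  | cons x xs ih =>
      by_cases hji : j = i
      · subst hji
        have hx : x ≠ 0 := by simpa using hnz
        simp only [pvEmit]
        rcases Nat.lt_or_ge (z j) (z' j) with h | h
        · exact pvRep_ne _ _ h x hx _ _
        · have h' : z' j < z j := by omega
          exact fun he => pvRep_ne _ _ h' x hx _ _ he.symm
      · have hzi : z i = z' i := hfirst i (le_refl i) (by omega)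
        simp only [pvEmit, hzi]
        intro h
        have htail : pvEmit z (i+1) xs = pvEmit z' (i+1) xs := by
          have := List.append_cancel_left h
          exact (List.cons.injEq _ _ _ _).mp this |>.2
        refine ih (i+1) (by omega) (by simp at hjl ⊢; omega) ?_ ?_ htail
        · exact fun j' h1 h2 => hfirst j' (by omega) h2
        · have : j - i = (j - (i+1)) + 1 := by omega
          rw [this] at hnz
          simpa using hnz

-- bumping position k adds one to the sum of the first m counts iff k < m
theorem pvSum_set (c : List Int) (k : Nat) (m : Nat) :
    ((c.set k (c.getD k 0 + 1)).take m).sum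
      = (c.take m).sum + (if k < m ∧ k < c.length then 1 else 0) := by
  induction c generalizing k m with
  | nil => simp
  | cons x xs ih =>
      cases m with
      | zero => simp
      | succ m' =>
          cases k with
          | zero =>
              simp only [List.getD_cons_zero, List.set_cons_zero, List.take_succ_cons,
                List.sum_cons]
              rw [if_pos ⟨by omega, by simp⟩]
              try ring
          | succ k' =>
              simp only [List.getD_cons_succ, List.set_cons_succ, List.take_succ_cons,
                List.sum_cons, ih k' m']
              have hiff : (k' < m' ∧ k' < xs.length) ↔ (k' + 1 < m' + 1 ∧ k' + 1 < (x :: xs).length) := by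
                simp only [List.length_cons]
                omega
              by_cases h : k' < m' ∧ k' < xs.length
              · rw [if_pos h, if_pos (hiff.mp h)]
                try ring
              · rw [if_neg h, if_neg (fun hh => h (hiff.mpr hh))]
                try ring

-- if two equal-length lists agree (getD) below m, their m-prefixes have equal sums
theorem pvTake_eq (c d : List Int) (m : Nat) (hl : c.length = d.length)
    (h : ∀ j < m, c.getD j 0 = d.getD j 0) : c.take m = d.take m := by
  induction c generalizing d m with
  | nil =>
      cases d with
      | nil => rfl
      | cons y ys => simp at hl
  | cons x xs ih =>
      cases d with
      | nil => simp at hl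
      | cons y ys =>
          cases m with
          | zero => simp
          | succ m' =>
              have hxy : x = y := by simpa using h 0 (by omega)
              simp only [List.take_succ_cons, hxy]
              rw [ih ys m' (by simpa using hl)
                (fun j hj => by simpa using h (j+1) (by omega))]

-- sum-below-f0 invariant: the anchored fold accumulates at least as much below the first 0 as the
-- simple fold, strictly more once a zero replenish point is preceded by a lower-index point
theorem pvSumInv (route : List Int) (fd : PySem.Dict Int Int)
    (hfdD : ∀ q : Int, fd.getD q (route.length : Int)
        = (match PySem.List.index? route q with
           | some k => (k : Int)
           | none => (route.length : Int)))
    (hfdg : ∀ q : Int, fd.get? q = (PySem.List.index? route q).map (fun k => ((k : Nat) : Int)))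
    (f0 : Nat) (hf0 : PySem.List.index? route 0 = some f0)
    (rest : List Int) (hall : ∀ p ∈ rest, p ∈ route)
    (zerosA zerosB : List Int) (a : Nat)
    (hlA : zerosA.length = route.length) (hlB : zerosB.length = route.length)
    (ha : a ≤ f0)
    (hge : (zerosB.take f0).sum ≤ (zerosA.take f0).sum) :
    (((rest.foldl (pvBStep fd (route.length : Int)) (zerosA, ((a : Nat) : Int))).1.take f0).sum
        ≥ ((rest.foldl (pvBStepSimple fd) zerosB).take f0).sum) ∧
    (((zerosB.take f0).sum < (zerosA.take f0).sum
        ∨ D_insert_replenish_points_for_route_helper_py rest route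
        ∨ (a < f0 ∧ (0:Int) ∈ rest)) →
      ((rest.foldl (pvBStepSimple fd) zerosB).take f0).sum
        < ((rest.foldl (pvBStep fd (route.length : Int)) (zerosA, ((a : Nat) : Int))).1.take f0).sum) := by
  obtain ⟨hf0len, _, _⟩ := PySem.List.getElem_of_index?_eq_some hf0
  induction rest generalizing zerosA zerosB a with
  | nil =>
      refine ⟨hge, ?_⟩
      rintro (h | h | h)
      · exact h
      · obtain ⟨j, hj, _⟩ := h
        simp at hj
      · simp at h
  | cons p rest' ih =>
      have hmem : p ∈ route := hall p List.mem_cons_self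
      rcases hidx : PySem.List.index? route p with _ | k
      · exact absurd ((PySem.List.index?_eq_none_iff route p).mp hidx) (by simp [hmem])
      obtain ⟨hk, _, _⟩ := PySem.List.getElem_of_index?_eq_some hidx
      have hkInt : ((k : Nat) : Int) < (route.length : Int) := by exact_mod_cast hk
      have hallR : ∀ q ∈ rest', q ∈ route := fun q hq => hall q (List.mem_cons_of_mem _ hq)
      simp only [List.foldl_cons]
      by_cases hp : p = 0
      · -- p = 0: A bumps at the anchor a, B bumps at f0
        subst hp
        have hkf0 : k = f0 := by rw [hf0] at hidx; injection hidx with h; omega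
        subst hkf0
        have haInt : ((a : Nat) : Int) < (route.length : Int) := by exact_mod_cast (by omega : a < route.length)
        have hBs : pvBStep fd (route.length : Int) (zerosA, ((a:Nat):Int)) 0
            = (zerosA.set a (zerosA.getD a 0 + 1), ((a:Nat):Int)) := by
          rw [pvBStep_zero fd _ zerosA _ haInt,
              PySem.List.pySetD_natCast, PySem.List.pyGetD_natCast,
              if_neg (lt_irrefl ((a:Nat) : Int))]
        have hSs : pvBStepSimple fd zerosB 0 = zerosB.set k (zerosB.getD k 0 + 1) := by
          unfold pvBStepSimple
          rw [hfdg 0, hidx]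
          simp only [Option.map_some]
          rw [PySem.List.pySetD_natCast, PySem.List.pyGetD_natCast]
        rw [hBs, hSs]
        have hsA := pvSum_set zerosA a k
        have hsB := pvSum_set zerosB k k
        rw [if_neg (by omega : ¬ (k < k ∧ k < zerosB.length))] at hsB
        have hge' : ((zerosB.set k (zerosB.getD k 0 + 1)).take k).sum
            ≤ ((zerosA.set a (zerosA.getD a 0 + 1)).take k).sum := by
          rw [hsA, hsB]
          split_ifs <;> omega
        have := ih hallR _ _ a (by simp [hlA]) (by simp [hlB]) ha hge'
        refine ⟨this.1, ?_⟩
        rintro (h | h | h)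
        · refine this.2 (Or.inl ?_)
          rw [hsA, hsB]
          split_ifs <;> omega
        · rw [pvD_cons] at h
          rcases h with ⟨_, habs⟩ | h
          · omega
          · exact this.2 (Or.inr (Or.inl h))
        · -- a < f0: this very step creates the strict gap
          refine this.2 (Or.inl ?_)
          rw [hsA, hsB, if_pos ⟨h.1, by omega⟩]
          omega
      · -- p ≠ 0: both folds bump at k = first index of p
        have hBs : pvBStep fd (route.length : Int) (zerosA, ((a:Nat):Int)) p
            = (zerosA.set k (zerosA.getD k 0 + 1),
               if ((k:Nat):Int) < ((a:Nat):Int) then ((k:Nat):Int) else ((a:Nat):Int)) := by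
          have hfdp : fd.getD p (route.length : Int) = ((k:Nat) : Int) := by rw [hfdD p, hidx]
          rw [pvBStep_nonzero fd _ zerosA _ p hp (by rw [hfdp]; exact hkInt), hfdp,
              PySem.List.pySetD_natCast, PySem.List.pyGetD_natCast]
        have hSs : pvBStepSimple fd zerosB p = zerosB.set k (zerosB.getD k 0 + 1) := by
          unfold pvBStepSimple
          rw [hfdg p, hidx]
          simp only [Option.map_some]
          rw [PySem.List.pySetD_natCast, PySem.List.pyGetD_natCast]
        have hanch : (if ((k:Nat):Int) < ((a:Nat):Int) then ((k:Nat):Int) else ((a:Nat):Int))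
            = (((min k a : Nat)) : Int) := by
          split_ifs with h
          · have : k < a := by exact_mod_cast h
            simp [Nat.min_def]
            omega
          · have : ¬ k < a := by exact_mod_cast h
            simp [Nat.min_def]
            omega
        rw [hBs, hSs, hanch]
        have hsA := pvSum_set zerosA k f0
        have hsB := pvSum_set zerosB k f0
        have hcond : (k < f0 ∧ k < zerosA.length) ↔ (k < f0 ∧ k < zerosB.length) := by
          rw [hlA, hlB]
        have hge' : ((zerosB.set k (zerosB.getD k 0 + 1)).take f0).sum
            ≤ ((zerosA.set k (zerosA.getD k 0 + 1)).take f0).sum := by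
          rw [hsA, hsB]
          split_ifs <;> omega
        have := ih hallR _ _ (min k a) (by simp [hlA]) (by simp [hlB]) (by omega) hge'
        refine ⟨this.1, ?_⟩
        rintro (h | h | h)
        · refine this.2 (Or.inl ?_)
          rw [hsA, hsB]
          split_ifs <;> omega
        · rw [pvD_cons] at h
          rcases h with ⟨hm, hlt⟩ | h
          · -- a later 0 with idx p < f0: the anchor drops below f0 now
            refine this.2 (Or.inr (Or.inr ⟨?_, hm⟩))
            have hpidx : pvIdxD route p = k := by unfold pvIdxD; rw [hidx, Option.getD_some]
            have hf0idx : pvIdxD route 0 = f0 := by unfold pvIdxD; rw [hf0, Option.getD_some]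
            rw [hpidx, hf0idx] at hlt
            omega
          · exact this.2 (Or.inr (Or.inl h))
        · rcases List.mem_cons.mp h.2 with h0 | h0
          · exact absurd h0.symm hp
          · exact this.2 (Or.inr (Or.inr ⟨by omega, h0⟩))

-- the simple fold preserves length
theorem pvZS_len (fd : PySem.Dict Int Int) (rp c : List Int) :
    (rp.foldl (pvBStepSimple fd) c).length = c.length := by
  induction rp generalizing c with
  | nil => rfl
  | cons p ps ih =>
      rw [List.foldl_cons]
      have : (pvBStepSimple fd c p).length = c.length := by
        unfold pvBStepSimple
        rcases fd.get? p with _ | a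
        · rfl
        · simp [PySem.List.length_pySetD]
      rw [ih (pvBStepSimple fd c p), this]

-- a list of nonnegative values has nonnegative getD 0 everywhere
theorem pvGetD_nonneg (c : List Int) (hc : ∀ v ∈ c, 0 ≤ v) (j : Nat) : 0 ≤ c.getD j 0 := by
  induction c generalizing j with
  | nil => simp
  | cons x xs ih =>
      cases j with
      | zero => simpa using hc x List.mem_cons_self
      | succ j' =>
          rw [List.getD_cons_succ]
          exact ih (fun v hv => hc v (List.mem_cons_of_mem _ hv)) j'

-- the simple fold keeps all counts nonnegative
theorem pvZS_nonneg (fd : PySem.Dict Int Int)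
    (hfdg : ∀ q : Int, ∀ v, fd.get? q = some v → 0 ≤ v)
    (rp c : List Int) (hc : ∀ v ∈ c, 0 ≤ v) :
    ∀ v ∈ rp.foldl (pvBStepSimple fd) c, 0 ≤ v := by
  induction rp generalizing c with
  | nil => exact hc
  | cons p ps ih =>
      rw [List.foldl_cons]
      refine ih (pvBStepSimple fd c p) ?_
      rcases ha : fd.get? p with _ | a
      · have hr : pvBStepSimple fd c p = c := by
          unfold pvBStepSimple
          rw [ha]
        rw [hr]
        exact hc
      · have hr : pvBStepSimple fd c p = PySem.List.pySetD c a (PySem.List.pyGetD c a 0 + 1) := by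
          unfold pvBStepSimple
          rw [ha]
        rw [hr]
        intro v hv
        have ha0 : 0 ≤ a := hfdg p a ha
        rw [PySem.List.pySetD_of_nonneg c _ ha0] at hv
        rcases List.mem_or_eq_of_mem_set hv with h | h
        · exact hc v h
        · subst h
          have h0 : 0 ≤ PySem.List.pyGetD c a 0 := by
            rw [PySem.List.pyGetD_of_nonneg c 0 ha0]
            exact pvGetD_nonneg c hc a.toNat
          omega
      
theorem insert_replenish_points_for_route_helper_py_tight :
    Claim_exact_insert_replenish_points_for_route_helper_py := by
  intro rp route _ hpre hD
  -- 0 is a replenish point, hence occurs in the route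
  have h0rp : (0:Int) ∈ rp := by
    obtain ⟨j, hj, hj0, _⟩ := hD
    have : rp.getD j 1 = rp[j] := by
      rw [List.getD_eq_getElem?_getD, List.getElem?_eq_getElem hj, Option.getD_some]
    rw [this] at hj0
    exact hj0 ▸ List.getElem_mem hj
  have h0route : (0:Int) ∈ route := hpre 0 h0rp
  rcases hf0 : PySem.List.index? route (0:Int) with _ | f0
  · exact absurd ((PySem.List.index?_eq_none_iff route 0).mp hf0) (by simp [h0route])
  obtain ⟨hf0len, _, hf0first⟩ := PySem.List.getElem_of_index?_eq_some hf0
  have hfd : ∀ p : Int, (pvFD route).getD p (route.length : Int)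
      = (match PySem.List.index? route p with
         | some k => (k : Int)
         | none => (route.length : Int)) := pvFirstDict_getD route
  have hfdg : ∀ p : Int, (pvFD route).get? p
      = (PySem.List.index? route p).map (fun k => ((k : Nat) : Int)) := pvFirstDict_get0 route
  have hinit : (pvFD route).getD 0 (route.length : Int) = ((f0 : Nat) : Int) := by
    rw [hfd 0, hf0]
  -- A's output is pvEmit of the anchored fold's counts
  have hanchor0 : (pvFD route).getD 0 (route.length : Int)
      = (((pvFZ (pvZF (List.replicate route.length (0:Int))) 0 route).getD route.length : Nat) : Int) := by
    rw [hfd 0, pvFZ_congr route 0 (pvZF_replicate route.length), pvFZ_of_zf_zero]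
    rcases PySem.List.index? route (0:Int) with _ | k <;> simp
  have hmain := pvMainInv route (pvFD route) hfd rp (fun p hp _ => hpre p hp)
    (List.replicate route.length (0:Int))
    ((pvFD route).getD 0 (route.length : Int))
    (by simp) (by intro v hv; simp [List.eq_of_mem_replicate hv]) hanchor0
    (fun _ => Or.inl (pvFZ_isSome_of_mem _ _ _ h0route))
  obtain ⟨hlenA, hnnA, hAB⟩ := hmain
  have hlenA' : (pvZA rp route).length = route.length := hlenA
  have hnnA' : ∀ v ∈ pvZA rp route, 0 ≤ v := hnnA
  have hrpne : rp.length ≠ 0 := by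
    obtain ⟨j, hj, _⟩ := hD
    omega
  have hArepr : insert_replenish_points_for_route_helper_py rp route
      = pvEmit (pvZF (pvZA rp route)) 0 route := by
    have hA : insert_replenish_points_for_route_helper_py rp route
        = if rp.length = 0 then route else rp.foldl pvAStep route := rfl
    rw [hA, if_neg hrpne]
    have hr : route = pvEmit (pvZF (List.replicate route.length (0:Int))) 0 route := by
      rw [pvEmit_congr _ (fun _ => 0) route 0 (fun j _ _ => pvZF_replicate route.length j),
          pvEmit_zero]
    calc rp.foldl pvAStep route
        = rp.foldl pvAStep (pvEmit (pvZF (List.replicate route.length (0:Int))) 0 route) := by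
          rw [← hr]
      _ = pvEmit (pvZF (pvZA rp route)) 0 route := hAB
  -- B's output is pvEmit of the simple fold's counts
  have hlenS : (pvZS rp route).length = route.length := by
    have : (rp.foldl (pvBStepSimple (pvFD route)) (List.replicate route.length (0:Int))).length
        = (List.replicate route.length (0:Int)).length := pvZS_len (pvFD route) rp _
    simpa using this
  have hBrepr : insert_replenish_points_for_route_helper_py_alt rp route
      = pvEmit (pvZF (pvZS rp route)) 0 route := by
    have hB : insert_replenish_points_for_route_helper_py_alt rp route
        = (List.zip (pvZS rp route) route).foldl
            (fun out cx => out ++ List.replicate cx.1.toNat 0 ++ [cx.2]) [] := rfl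
    rw [hB, pvZipFold _ _ _ hlenS, pvEmitL_eq _ _ hlenS, List.nil_append]
  -- the anchored fold ends strictly ahead below f0
  have hsum := pvSumInv route (pvFD route) hfd hfdg f0 hf0 rp (fun p hp => hpre p hp)
    (List.replicate route.length (0:Int)) (List.replicate route.length (0:Int)) f0
    (by simp) (by simp) (le_refl f0) (le_refl _)
  have hstrict : ((pvZS rp route).take f0).sum < ((pvZA rp route).take f0).sum := by
    have h := hsum.2 (Or.inr (Or.inl hD))
    have hZA : pvZA rp route
        = (rp.foldl (pvBStep (pvFD route) (route.length : Int))
            (List.replicate route.length (0:Int), ((f0 : Nat) : Int))).1 := by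
      unfold pvZA
      rw [hinit]
    rw [hZA]
    exact h
  -- hence the two count lists first differ at some position j0 < f0, where route[j0] ≠ 0
  have hlensEq : (pvZA rp route).length = (pvZS rp route).length := by
    rw [hlenA', hlenS]
  have hex : ∃ j, j < f0 ∧ (pvZA rp route).getD j 0 ≠ (pvZS rp route).getD j 0 := by
    by_contra hno
    push Not at hno
    have := pvTake_eq (pvZA rp route) (pvZS rp route) f0 hlensEq (fun j hj => hno j hj)
    rw [this] at hstrict
    omega
  have hexP : ∃ j, (pvZA rp route).getD j 0 ≠ (pvZS rp route).getD j 0 :=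
    ⟨hex.choose, hex.choose_spec.2⟩
  obtain ⟨j0, hj0d, hj0min, hj0f0⟩ :
      ∃ j0, (pvZA rp route).getD j0 0 ≠ (pvZS rp route).getD j0 0
        ∧ (∀ j' < j0, (pvZA rp route).getD j' 0 = (pvZS rp route).getD j' 0)
        ∧ j0 < f0 := by
    refine ⟨Nat.find hexP, Nat.find_spec hexP, ?_, ?_⟩
    · intro j' hj'
      by_contra hc
      exact Nat.find_min hexP hj' hc
    · obtain ⟨j, hj, hjd⟩ := hex
      have hle : Nat.find hexP ≤ j := Nat.find_le hjd
      omega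
  -- counts are nonnegative on both sides, so the toNat views differ too
  have hnnS : ∀ v ∈ pvZS rp route, 0 ≤ v := by
    refine pvZS_nonneg _ ?_ _ _ (by intro v hv; simp [List.eq_of_mem_replicate hv])
    intro q v hq
    rw [hfdg q] at hq
    rcases hi : PySem.List.index? route q with _ | k
    · rw [hi] at hq
      simp at hq
    · rw [hi] at hq
      simp only [Option.map_some, Option.some.injEq] at hq
      omega
  have hzfd : pvZF (pvZA rp route) j0 ≠ pvZF (pvZS rp route) j0 := by
    have h1 := pvGetD_nonneg _ hnnA' j0
    have h2 := pvGetD_nonneg _ hnnS j0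
    unfold pvZF
    intro he
    exact hj0d (by omega)
  have hzffirst : ∀ j', 0 ≤ j' → j' < j0 → pvZF (pvZA rp route) j' = pvZF (pvZS rp route) j' := by
    intro j' _ hj'
    unfold pvZF
    rw [hj0min j' hj']
  have hnz : route.getD (j0 - 0) 0 ≠ 0 := by
    have hlt : j0 < route.length := by omega
    have : route.getD (j0 - 0) 0 = route[j0] := by
      rw [Nat.sub_zero, List.getD_eq_getElem?_getD, List.getElem?_eq_getElem hlt, Option.getD_some]
    rw [this]
    exact hf0first j0 (by omega)
  have hne := pvEmit_ne (pvZF (pvZA rp route)) (pvZF (pvZS rp route)) route 0 j0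
    (by omega) (by omega) hzfd hzffirst hnz
  rw [hArepr, hBrepr]
  exact hne
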